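-- pv_equiv track=rewrite | github.com/larrysong132/CSE-8A | pa7.py | update_standing
-- ===== SOURCE A (Python) =====
-- def update_standing(win_record, new_winners):
--     new_win_record = {}
--     for key in win_record:
--         result = win_record.get(key)
--         new_win_record[key] = result
--         if key in new_winners:
--             result = win_record.get(key) + 1
--             new_win_record[key] = result
--     return new_win_record
-- ===== SOURCE B (Python) =====
-- def update_standing(win_record, new_winners):
--     # Copy the standings once, then bump each distinct winner that is present.
--     new_win_record = dict(win_record)
--     for winner in dict.fromkeys(new_winners):
--         if winner in new_win_record:
--             new_win_record[winner] += 1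
--     return new_win_record
-- ===== Notes on version B (the rewrite author's own statement) =====
-- stated objective: faster
-- what changed: B copies the record once with dict() and then iterates over the deduplicated winners, incrementing the keys that are present, instead of A's loop over every record key with a linear 'key in new_winners' list scan per key.
import Mathlib
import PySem

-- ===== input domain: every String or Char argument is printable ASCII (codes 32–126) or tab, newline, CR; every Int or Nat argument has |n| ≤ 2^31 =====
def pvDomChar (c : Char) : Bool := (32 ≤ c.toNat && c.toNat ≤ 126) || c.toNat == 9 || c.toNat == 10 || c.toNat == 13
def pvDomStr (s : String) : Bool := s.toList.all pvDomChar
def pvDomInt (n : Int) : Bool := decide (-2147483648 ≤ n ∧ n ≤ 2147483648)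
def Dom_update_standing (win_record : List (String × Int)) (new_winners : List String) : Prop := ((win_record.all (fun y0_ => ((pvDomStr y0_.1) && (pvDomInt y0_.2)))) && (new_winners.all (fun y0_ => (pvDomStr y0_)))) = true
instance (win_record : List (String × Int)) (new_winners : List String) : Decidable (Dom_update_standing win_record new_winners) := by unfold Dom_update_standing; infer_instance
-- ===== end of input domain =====

-- B copies the record dict once and then bumps each distinct present winner, instead of
-- A's rebuild that walks every record key testing it against the winners list (objective: simpler).

-- ===== PORT A =====
-- 'for key in win_record' iterates the dict's keys; 'win_record.get(key)' is ported as
-- getD _ 0 — exact here, because key always comes from the dict's own keys.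
def update_standing (win_record : List (String × Int)) (new_winners : List String) : List (String × Int) :=
  let wrd := PySem.Dict.ofList win_record
  (wrd.keys.foldl (fun (new_win_record : PySem.Dict String Int) key =>
      let result := wrd.getD key 0
      let new_win_record := new_win_record.insert key result
      if key ∈ new_winners then
        new_win_record.insert key (wrd.getD key 0 + 1)
      else new_win_record)
    PySem.Dict.empty).items

-- ===== PORT B =====
def update_standing_alt (win_record : List (String × Int)) (new_winners : List String) : List (String × Int) :=
  let new_win_record := PySem.Dict.ofList win_record
  ((PySem.List.dedup new_winners).foldl (fun (d : PySem.Dict String Int) winner =>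
      if d.contains winner then d.modify winner 0 (· + 1) else d)
    new_win_record).items

-- ===== PRECONDITION & SPEC =====
def Spec_update_standing (win_record : List (String × Int)) (new_winners : List String) (out : List (String × Int)) : Prop := out = update_standing_alt win_record new_winners
instance (win_record : List (String × Int)) (new_winners : List String) (out : List (String × Int)) : Decidable (Spec_update_standing win_record new_winners out) := by unfold Spec_update_standing; infer_instance

-- ===== CLAIM (what is proved, stated in full; the proofs are below) =====
def Claim_equal_update_standing : Prop := ∀ (win_record : List (String × Int)) (new_winners : List String), Dom_update_standing win_record new_winners → Spec_update_standing win_record new_winners (update_standing win_record new_winners)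

-- ===== LEMMAS AND PROOFS =====

-- B's loop body never changes the key list.
theorem bstep_keys (l : List String) (d : PySem.Dict String Int) :
    (l.foldl (fun (d : PySem.Dict String Int) w =>
        if d.contains w then d.modify w 0 (· + 1) else d) d).keys = d.keys := by
  induction l generalizing d with
  | nil => rfl
  | cons w t ih =>
      simp only [List.foldl_cons]
      split
      · rw [ih]
        exact PySem.Dict.keys_insert_of_contains _ _ (by assumption)
      · exact ih d

-- B's loop adds 1 exactly to the keys that occur in the (duplicate-free) winner list.
theorem bstep_getD (l : List String) (hl : l.Nodup) (d : PySem.Dict String Int) (k : String) :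
    (l.foldl (fun (d : PySem.Dict String Int) w =>
        if d.contains w then d.modify w 0 (· + 1) else d) d).getD k 0 =
      d.getD k 0 + (if k ∈ l ∧ d.contains k = true then 1 else 0) := by
  induction l generalizing d with
  | nil => simp
  | cons w t ih =>
      rcases List.nodup_cons.mp hl with ⟨hw, ht⟩
      simp only [List.foldl_cons]
      by_cases hc : d.contains w = true
      · rw [if_pos hc, ih ht]
        have hck : ∀ x, (d.modify w 0 (· + 1)).contains x = d.contains x := by
          intro x
          by_cases hxw : x = w
          · subst hxw; simp [PySem.Dict.contains_modify, hc]
          · simp [PySem.Dict.contains_modify, hxw]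
        rw [hck k, PySem.Dict.getD_modify]
        by_cases hkw : k = w
        · subst hkw
          simp [hw, hc]
        · simp only [if_neg hkw, List.mem_cons]
          by_cases hkt : k ∈ t <;> simp [hkt, hkw]
      · rw [if_neg hc, ih ht]
        by_cases hkw : k = w
        · subst hkw
          simp [hc]
        · simp only [List.mem_cons]
          by_cases hkt : k ∈ t <;> simp [hkt, hkw]

theorem update_standing_eq (win_record : List (String × Int)) (new_winners : List String) :
    update_standing win_record new_winners = update_standing_alt win_record new_winners := by
  unfold update_standing update_standing_alt
  set wrd := PySem.Dict.ofList win_record with hwrd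
  have hnd : wrd.keys.Nodup := PySem.Dict.nodup_keys_ofList win_record
  -- A side: the two inserts per key collapse to one insert of the final value; a fold of
  -- fresh distinct inserts into the empty dict appends its items.
  have hA : (wrd.keys.foldl (fun (new_win_record : PySem.Dict String Int) key =>
      let result := wrd.getD key 0
      let new_win_record := new_win_record.insert key result
      if key ∈ new_winners then
        new_win_record.insert key (wrd.getD key 0 + 1)
      else new_win_record) PySem.Dict.empty).items =
      wrd.keys.map (fun k => (k, wrd.getD k 0 + (if k ∈ new_winners then 1 else 0))) := by
    have hfun : (fun (new_win_record : PySem.Dict String Int) key =>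
        let result := wrd.getD key 0
        let new_win_record := new_win_record.insert key result
        if key ∈ new_winners then
          new_win_record.insert key (wrd.getD key 0 + 1)
        else new_win_record) =
        (fun (d : PySem.Dict String Int) k =>
          d.insert k (wrd.getD k 0 + (if k ∈ new_winners then 1 else 0))) := by
      funext d k
      by_cases h : k ∈ new_winners
      · simp [h, PySem.Dict.insert_insert_self]
      · simp [h]
    rw [hfun]
    have := PySem.Dict.items_foldl_insert_fresh (l := wrd.keys)
      (k := fun a => a) (v := fun a => wrd.getD a 0 + (if a ∈ new_winners then 1 else 0))
      (d := PySem.Dict.empty) (by intro a _; simp) (by simpa using hnd)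
    simpa using this
  rw [hA]
  -- B side: items via keys, keys unchanged, values bumped where the winner is a key.
  set fd := ((PySem.List.dedup new_winners).foldl (fun (d : PySem.Dict String Int) winner =>
      if d.contains winner then d.modify winner 0 (· + 1) else d) wrd) with hfd
  have hkeys : fd.keys = wrd.keys := bstep_keys _ _
  have hndf : fd.keys.Nodup := by rw [hkeys]; exact hnd
  rw [PySem.Dict.items_eq_map_keys fd hndf 0, hkeys]
  apply List.map_congr_left
  intro k hk
  have hck : wrd.contains k = true := (PySem.Dict.contains_iff_mem_keys wrd k).mpr hk
  rw [hfd, bstep_getD _ (PySem.List.nodup_dedup _) _ _]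
  simp [PySem.List.dedup_eq_ofList, PySem.Set.mem_ofList, hck]

-- ===== VERDICT (by name: the statement is the Claim_ definition above) =====
theorem update_standing_spec : Claim_equal_update_standing := by
  intro wr nw _
  exact update_standing_eq wr nw
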